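-- pv_equiv track=rewrite | github.com/SeraVault/isotopeiq-satellite | examples/windows_baseline_parser.py | _classify_iface_windows
-- ===== SOURCE A (Python) =====
-- def _classify_iface_windows(name):
--     nl = name.lower()
--     if 'loopback' in nl:
--         return 'loopback'
--     if 'teredo' in nl or 'isatap' in nl or '6to4' in nl:
--         return 'tunnel'
--     if any(v in nl for v in ('vmware', 'virtualbox', 'hyper-v', 'virtual adapter')):
--         return 'virtual'
--     if 'wan miniport' in nl or 'kernel debug' in nl:
--         return 'skip'
--     return 'physical'
-- ===== SOURCE B (Python) =====
-- # B: instead of an ordered if-chain with early return, scan ALL keywords once,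
-- # aggregate the minimum priority level of any matching keyword, and index into
-- # the label table.  Correct because labels are ordered by priority: the first
-- # matching rule of A is exactly the minimum level among all matched keywords.
-- KEYWORD_LEVEL = {
--     'loopback': 0,
--     'teredo': 1, 'isatap': 1, '6to4': 1,
--     'vmware': 2, 'virtualbox': 2, 'hyper-v': 2, 'virtual adapter': 2,
--     'wan miniport': 3, 'kernel debug': 3,
-- }
-- LABELS = ('loopback', 'tunnel', 'virtual', 'skip', 'physical')
--
--
-- def _classify_iface_windows(name):
--     nl = name.lower()
--     level = min((lvl for kw, lvl in KEYWORD_LEVEL.items() if kw in nl), default=4)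
--     return LABELS[level]
-- ===== Notes on version B (the rewrite author's own statement) =====
-- stated objective: alternative
-- what changed: Replaces the early-return if-chain by a flat keyword->priority map scanned in full, taking the minimum matched priority and indexing a label table; no early return or per-rule any().
import Mathlib
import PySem

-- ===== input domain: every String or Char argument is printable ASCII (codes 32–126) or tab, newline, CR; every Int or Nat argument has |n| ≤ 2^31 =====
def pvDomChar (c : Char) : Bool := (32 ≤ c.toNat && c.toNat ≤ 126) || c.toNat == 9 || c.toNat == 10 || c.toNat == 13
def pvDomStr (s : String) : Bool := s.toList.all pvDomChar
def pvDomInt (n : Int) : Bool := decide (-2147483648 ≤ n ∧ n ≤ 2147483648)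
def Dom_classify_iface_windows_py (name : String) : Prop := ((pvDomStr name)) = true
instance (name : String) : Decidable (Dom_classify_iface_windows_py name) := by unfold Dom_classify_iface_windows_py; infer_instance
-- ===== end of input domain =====

-- B replaces A's early-return if-chain by a flat keyword→priority map scanned in full,
-- taking the minimum matched priority and indexing a label table (alternative; same cost).

-- ===== PORT A =====
def classify_iface_windows_py (name : String) : String :=
  let nl := PySem.Str.lower name
  if PySem.Str.isIn "loopback" nl then "loopback"
  else if PySem.Str.isIn "teredo" nl || PySem.Str.isIn "isatap" nl || PySem.Str.isIn "6to4" nl then "tunnel"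
  else if ["vmware", "virtualbox", "hyper-v", "virtual adapter"].any (fun v => PySem.Str.isIn v nl) then "virtual"
  else if PySem.Str.isIn "wan miniport" nl || PySem.Str.isIn "kernel debug" nl then "skip"
  else "physical"

-- ===== PORT B =====
def pvKeywordLevels : List (String × Nat) :=
  [("loopback", 0),
   ("teredo", 1), ("isatap", 1), ("6to4", 1),
   ("vmware", 2), ("virtualbox", 2), ("hyper-v", 2), ("virtual adapter", 2),
   ("wan miniport", 3), ("kernel debug", 3)]

def pvLabels : List String := ["loopback", "tunnel", "virtual", "skip", "physical"]

def classify_iface_windows_py_alt (name : String) : String :=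
  let nl := PySem.Str.lower name
  let levels := pvKeywordLevels.filterMap (fun p => if PySem.Str.isIn p.1 nl then some p.2 else none)
  let level := (PySem.List.min? levels (fun x => x)).getD 4   -- min(..., default=4)
  pvLabels.getD level ""   -- LABELS[level]; level ≤ 4 always, so the index is in range

-- ===== PRECONDITION & SPEC =====
def Spec_classify_iface_windows_py (name : String) (out : String) : Prop := out = classify_iface_windows_py_alt name
instance (name : String) (out : String) : Decidable (Spec_classify_iface_windows_py name out) := by unfold Spec_classify_iface_windows_py; infer_instance

-- ===== CLAIM (what is proved, stated in full; the proofs are below) =====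
def Claim_equal_classify_iface_windows_py : Prop := ∀ (name : String), Dom_classify_iface_windows_py name → Spec_classify_iface_windows_py name (classify_iface_windows_py name)

-- ===== LEMMAS AND PROOFS =====

-- ===== VERDICT (by name: the statement is the Claim_ definition above) =====
set_option maxHeartbeats 2000000 in
theorem classify_iface_windows_py_spec : Claim_equal_classify_iface_windows_py := by
  intro name _
  unfold Spec_classify_iface_windows_py classify_iface_windows_py classify_iface_windows_py_alt pvKeywordLevels pvLabels
  simp only [List.any_cons, List.any_nil, Bool.or_false, List.filterMap_cons, List.filterMap_nil]
  generalize PySem.Str.isIn "loopback" (PySem.Str.lower name) = b0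
  generalize PySem.Str.isIn "teredo" (PySem.Str.lower name) = b1
  generalize PySem.Str.isIn "isatap" (PySem.Str.lower name) = b2
  generalize PySem.Str.isIn "6to4" (PySem.Str.lower name) = b3
  generalize PySem.Str.isIn "vmware" (PySem.Str.lower name) = b4
  generalize PySem.Str.isIn "virtualbox" (PySem.Str.lower name) = b5
  generalize PySem.Str.isIn "hyper-v" (PySem.Str.lower name) = b6
  generalize PySem.Str.isIn "virtual adapter" (PySem.Str.lower name) = b7
  generalize PySem.Str.isIn "wan miniport" (PySem.Str.lower name) = b8
  generalize PySem.Str.isIn "kernel debug" (PySem.Str.lower name) = b9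
  revert b0 b1 b2 b3 b4 b5 b6 b7 b8 b9
  decide
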